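-- pv_equiv track=rewrite | github.com/NWChen/advent-of-code | 2025_py/6_2.py | process
-- ===== SOURCE A (Python) =====
-- def process(input: list[str]) -> list[list[str]]:
--     # 1. scan for columns that are all whitespace
--     separator_col_idxs = [-1]
--     maxlen = max([len(line) for line in input])
--     for i in range(maxlen):
--         if all([line[i] == " " for line in input]):
--             separator_col_idxs.append(i)
--     separator_col_idxs.append(maxlen)
--
--     # 2. split input on those columns
--     out = []
--     for line in input:
--         row = []
--         for i in range(len(separator_col_idxs) - 1):
--             start, end = separator_col_idxs[i], separator_col_idxs[i + 1]
--             row.append(line[start + 1 : end])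
--         out.append(row)
--     return out
-- ===== SOURCE B (Python) =====
-- def process(input: list[str]) -> list[list[str]]:
--     # 1. same separator scan as A (kept so ragged/empty inputs raise identically), but stored as a set
--     maxlen = max([len(line) for line in input])
--     seps = set()
--     for i in range(maxlen):
--         if all([line[i] == " " for line in input]):
--             seps.add(i)
--
--     # 2. streaming split: one pass over each line, flushing the buffer at separator columns
--     out = []
--     for line in input:
--         fields = []
--         buf = []
--         for col in range(maxlen):
--             if col in seps:
--                 fields.append("".join(buf))
--                 buf = []
--             else:
--                 buf.append(line[col])
--         fields.append("".join(buf))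
--         out.append(fields)
--     return out
-- ===== Notes on version B (the rewrite author's own statement) =====
-- stated objective: alternative
-- what changed: Step 2's slicing between consecutive pairs of a separator-index list (indexed by i and i+1) is replaced by a single streaming pass per line that accumulates characters into a field buffer and flushes it at separator columns, with separator columns kept in a set; only the separator-column scan of step 1 is retained.
import Mathlib
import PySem

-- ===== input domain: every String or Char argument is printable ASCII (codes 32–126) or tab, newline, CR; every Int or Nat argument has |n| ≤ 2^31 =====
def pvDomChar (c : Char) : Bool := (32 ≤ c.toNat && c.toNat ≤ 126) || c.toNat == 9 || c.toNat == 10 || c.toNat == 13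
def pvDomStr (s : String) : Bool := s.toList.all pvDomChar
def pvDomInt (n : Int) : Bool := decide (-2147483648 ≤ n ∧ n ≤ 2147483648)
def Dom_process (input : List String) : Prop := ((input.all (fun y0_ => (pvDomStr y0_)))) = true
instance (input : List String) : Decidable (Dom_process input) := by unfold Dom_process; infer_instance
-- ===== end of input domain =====

-- B replaces step 2's index-pair slicing with a streaming per-line pass that flushes a field
-- buffer at separator columns (objective: alternative decomposition, same cost).

-- ===== PORT A =====
-- maxlen = max([len(line) for line in input]); '.getD 0' is only reached on input = [],
-- where Python raises ValueError (outside Pre_)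
def pyMaxLen (input : List String) : Int :=
  (PySem.List.max? (input.map (fun line => (line.toList.length : Int))) (fun y => y)).getD 0

-- all([line[i] == " " for line in input]); pyGet? = none is Python's IndexError on a ragged
-- input (outside Pre_); this step-1 scan is shared verbatim by both Pythons
def isSepCol (input : List String) (i : Int) : Bool :=
  input.all (fun line => PySem.List.pyGet? line.toList i == some ' ')

-- separator_col_idxs = [-1]; for i in range(maxlen): … append(i); … append(maxlen)
def sepColIdxs (input : List String) : List Int :=
  ((PySem.List.pyRange 0 (pyMaxLen input) 1).foldl
    (fun acc i => if isSepCol input i then acc ++ [i] else acc) [-1]) ++ [pyMaxLen input]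

-- row = []; for i in range(len(seps)-1): row.append(line[seps[i]+1 : seps[i+1]])
def aRow (seps : List Int) (line : String) : List String :=
  (PySem.List.pyRange 0 ((seps.length : Int) - 1) 1).foldl
    (fun row i =>
      row ++ [String.ofList (PySem.List.slice line.toList
        (some ((PySem.List.pyGet? seps i).getD 0 + 1))
        (some ((PySem.List.pyGet? seps (i + 1)).getD 0)))]) []

def process (input : List String) : List (List String) :=
  input.foldl (fun out line => out ++ [aRow (sepColIdxs input) line]) []

-- ===== PORT B =====
-- seps = set(); for i in range(maxlen): if all(…): seps.add(i)
def sepColSet (input : List String) : PySem.Set Int :=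
  (PySem.List.pyRange 0 (pyMaxLen input) 1).foldl
    (fun s i => if isSepCol input i then PySem.Set.add s i else s) PySem.Set.empty

-- fields/buf streaming pass: flush buf at separator columns, then a final flush
def bRow (maxlen : Int) (seps : PySem.Set Int) (line : String) : List String :=
  let st := (PySem.List.pyRange 0 maxlen 1).foldl
    (fun (st : List String × List Char) col =>
      if PySem.Set.contains seps col then (st.1 ++ [String.ofList st.2], ([] : List Char))
      else (st.1, st.2 ++ [(PySem.List.pyGet? line.toList col).getD ' ']))
    ([], [])
  st.1 ++ [String.ofList st.2]

def process_alt (input : List String) : List (List String) :=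
  input.foldl (fun out line => out ++ [bRow (pyMaxLen input) (sepColSet input) line]) []

-- ===== PRECONDITION & SPEC =====
-- Pre_ excludes exactly the inputs on which A raises: the empty list (ValueError from max([]))
-- and ragged inputs, where line[i] raises IndexError at some column; wherever A returns, Pre_ holds.
def Pre_process (input : List String) : Prop :=
  input ≠ [] ∧ ∀ s ∈ input, ∀ t ∈ input, s.toList.length = t.toList.length
instance (input : List String) : Decidable (Pre_process input) := by unfold Pre_process; infer_instance

def pvWitness_process : List String := ["a c", "b d"]

def Spec_process (input : List String) (out : List (List String)) : Prop := out = process_alt input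
instance (input : List String) (out : List (List String)) : Decidable (Spec_process input out) := by unfold Spec_process; infer_instance

-- ===== CLAIM (what is proved, stated in full; the proofs are below) =====
def Claim_equal_process : Prop := ∀ (input : List String), Dom_process input → Pre_process input → Spec_process input (process input)

-- ===== LEMMAS AND PROOFS =====

-- the fields cut by a boundary list: one slice per adjacent pair of boundaries
def fieldsOf (l : List Char) (bs : List Int) : List String :=
  (bs.zip bs.tail).map (fun q => String.ofList (PySem.List.slice l (some (q.1 + 1)) (some q.2)))

theorem fieldsOf_cons₂ (l : List Char) (a c : Int) (bs : List Int) :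
    fieldsOf l (a :: c :: bs)
      = String.ofList (PySem.List.slice l (some (a + 1)) (some c)) :: fieldsOf l (c :: bs) := by
  simp [fieldsOf]

theorem fieldsOf_concat (l : List Char) (a : Int) (bs : List Int) (b : Int) :
    fieldsOf l ((a :: bs) ++ [b])
      = fieldsOf l (a :: bs)
        ++ [String.ofList (PySem.List.slice l (some ((a :: bs).getLastD 0 + 1)) (some b))] := by
  induction bs generalizing a with
  | nil => simp [fieldsOf]
  | cons c bs ih =>
      calc fieldsOf l ((a :: c :: bs) ++ [b])
          = String.ofList (PySem.List.slice l (some (a + 1)) (some c))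
              :: fieldsOf l ((c :: bs) ++ [b]) := by
            simpa using fieldsOf_cons₂ l a c (bs ++ [b])
        _ = _ := by rw [ih c, fieldsOf_cons₂]; simp

theorem aRow_eq_fieldsOf (line : String) (b0 : Int) (bs : List Int) :
    aRow (b0 :: bs) line = fieldsOf line.toList (b0 :: bs) := by
  unfold aRow fieldsOf
  have hlen : (((b0 :: bs).length : Nat) : Int) - 1 = ((bs.length : Nat) : Int) := by simp
  rw [hlen, PySem.List.pyRange_zero_natCast, PySem.List.foldl_append_singleton_eq_map]
  simp only [List.map_map, List.nil_append]
  apply List.ext_getElem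
  · simp
  · intro i h1 h2
    have hi : i < bs.length := by simpa using h1
    have hcast : ((i : Nat) : Int) + 1 = (((i + 1 : Nat) : Nat) : Int) := by push_cast; ring
    simp only [List.getElem_map, List.getElem_range, Function.comp_apply, List.getElem_zip,
      List.tail_cons, hcast, PySem.List.pyGet?_natCast]
    rw [List.getElem?_eq_getElem (by simpa using Nat.lt_succ_of_lt hi),
        List.getElem?_eq_getElem (by simpa using Nat.succ_lt_succ hi)]
    simp

theorem set_contains_iff (s : List Int) (x : Int) :
    PySem.Set.contains s x = true ↔ x ∈ s := by
  simp [PySem.Set.contains]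

theorem setAdd_fold_filter (q : Int → Bool) :
    ∀ (xs acc : List Int), xs.Nodup → (∀ x ∈ xs, x ∉ acc) →
      xs.foldl (fun s i => if q i then PySem.Set.add s i else s) acc = acc ++ xs.filter q := by
  intro xs
  induction xs with
  | nil => intro acc _ _; simp
  | cons x xs ih =>
      intro acc hnd hdisj
      simp only [List.foldl_cons]
      cases hx : q x with
      | false =>
          rw [if_neg Bool.false_ne_true,
            ih acc hnd.of_cons (fun y hy => hdisj y (List.mem_cons_of_mem _ hy))]
          simp [hx]
      | true =>
          have hx' : x ∉ acc := hdisj x (by simp)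
          have hadd : PySem.Set.add acc x = acc ++ [x] := by
            simp [PySem.Set.add, PySem.Set.contains, hx']
          rw [if_pos rfl, hadd,
            ih (acc ++ [x]) hnd.of_cons (by
              intro y hy
              simp only [List.mem_append, List.mem_singleton]
              rintro (hmem | rfl)
              · exact hdisj y (List.mem_cons_of_mem _ hy) hmem
              · exact (List.nodup_cons.1 hnd).1 hy)]
          simp [hx]

theorem lastD_map_cases (cs : List Nat) (n : Nat) (h : ∀ c ∈ cs, c < n) :
    ∃ a : Nat, a ≤ n ∧ ((cs.map (fun c : Nat => (c : Int))).getLastD (-1)) + 1 = (a : Int) := by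
  rcases cs.eq_nil_or_concat with rfl | ⟨cs', c, rfl⟩
  · exact ⟨0, Nat.zero_le _, by simp⟩
  · refine ⟨c + 1, by have := h c (by simp); omega, ?_⟩
    simp only [List.concat_eq_append, List.map_append, List.map_cons, List.map_nil,
      List.getLastD_concat]
    push_cast
    ring

theorem stream_inv (l : List Char) (p : Nat → Bool) :
    ∀ (n : Nat), n ≤ l.length →
      (List.range n).foldl
        (fun (st : List String × List Char) c =>
          if p c then (st.1 ++ [String.ofList st.2], ([] : List Char))
          else (st.1, st.2 ++ [(l[c]?).getD ' ']))
        ([], [])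
      = (fieldsOf l (-1 :: ((List.range n).filter p).map (fun c : Nat => (c : Int))),
         PySem.List.slice l
           (some ((((List.range n).filter p).map (fun c : Nat => (c : Int))).getLastD (-1) + 1))
           (some (n : Int))) := by
  intro n
  induction n with
  | zero =>
      intro _
      have h0 : PySem.List.slice l (some ((0 : Nat) : Int)) (some ((0 : Nat) : Int)) = [] := by
        rw [PySem.List.slice_natCast]; simp
      simp only [List.range_zero, List.filter_nil, List.map_nil, List.foldl_nil,
        List.getLastD_nil]
      rw [show ((-1 : Int) + 1) = ((0 : Nat) : Int) by norm_num, h0]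
      simp [fieldsOf]
  | succ n ih =>
      intro hn
      have hn' : n ≤ l.length := Nat.le_of_succ_le hn
      have hnl : n < l.length := hn
      have hmem : ∀ c ∈ (List.range n).filter p, c < n := fun c hc =>
        List.mem_range.1 (List.mem_of_mem_filter hc)
      rw [List.range_succ, List.foldl_append, ih hn', List.foldl_cons, List.foldl_nil,
        List.filter_append]
      dsimp only
      cases hp : p n with
      | true =>
          have hfil : List.filter p [n] = [n] := by simp [hp]
          rw [if_pos rfl, hfil, List.map_append, List.map_cons, List.map_nil]
          refine congrArg₂ Prod.mk ?_ ?_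
          · rw [← List.cons_append, fieldsOf_concat, List.getLastD_cons]
          · rw [List.getLastD_concat]
            have hc1 : ((n : Nat) : Int) + 1 = (((n + 1 : Nat)) : Int) := by push_cast; ring
            rw [hc1, PySem.List.slice_natCast]
            simp
      | false =>
          have hfil : List.filter p [n] = [] := by simp [hp]
          rw [if_neg Bool.false_ne_true, hfil, List.append_nil]
          refine congrArg₂ Prod.mk rfl ?_
          obtain ⟨a, ha, hEq⟩ := lastD_map_cases ((List.range n).filter p) n hmem
          rw [hEq, PySem.List.slice_natCast, PySem.List.slice_natCast]
          have h1 : n + 1 - a = (n - a) + 1 := by omega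
          rw [h1, List.take_add_one]
          have h2 : (l.drop a)[n - a]? = some l[n] := by
            rw [List.getElem?_drop, show a + (n - a) = n from by omega]
            exact List.getElem?_eq_getElem hnl
          rw [h2, List.getElem?_eq_getElem hnl]
          simp

-- ===== VERDICT (by name: the statement is the Claim_ definition above) =====
theorem process_spec : Claim_equal_process := by
  intro input _hdom hpre
  obtain ⟨hne, hlen⟩ := hpre
  unfold Spec_process
  cases input with
  | nil => exact absurd rfl hne
  | cons h t =>
    have hlen' : ∀ s ∈ h :: t, s.toList.length = h.toList.length :=
      fun s hs => hlen s hs h (by simp)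
    have hM : pyMaxLen (h :: t) = (h.toList.length : Int) := by
      unfold pyMaxLen
      rw [List.map_cons, PySem.List.max?_id_cons, Option.getD_some]
      rcases PySem.List.foldl_max_mem (t.map (fun line => (line.toList.length : Int)))
          (h.toList.length : Int) with hE | hE
      · rw [hE]
      · obtain ⟨s, hs, hval⟩ := List.mem_map.1 hE
        rw [← hval]
        have hsl := hlen' s (List.mem_cons_of_mem _ hs)
        simp [hsl]
    have hseps : sepColIdxs (h :: t)
        = -1 :: (((List.range h.toList.length).filter
              (fun c : Nat => isSepCol (h :: t) (c : Int))).map (fun c : Nat => (c : Int))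
            ++ [(h.toList.length : Int)]) := by
      unfold sepColIdxs
      rw [hM, PySem.List.pyRange_zero_natCast, PySem.List.foldl_append_if_eq_filter,
        List.filter_map]
      simp only [Function.comp_def, List.cons_append, List.nil_append]
    have hnd : ((List.range h.toList.length).map (fun c : Nat => (c : Int))).Nodup :=
      List.Nodup.map (fun a b hab => by exact_mod_cast hab) List.nodup_range
    have hset : sepColSet (h :: t)
        = ((List.range h.toList.length).filter
            (fun c : Nat => isSepCol (h :: t) (c : Int))).map (fun c : Nat => (c : Int)) := by
      unfold sepColSet
      rw [hM, PySem.List.pyRange_zero_natCast,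
        setAdd_fold_filter _ _ _ hnd (by intro x _ hx; simp [PySem.Set.empty] at hx),
        List.filter_map]
      simp only [Function.comp_def, PySem.Set.empty, List.nil_append]
    have hcontAll : ∀ c : Nat,
        PySem.Set.contains (((List.range h.toList.length).filter
            (fun c : Nat => isSepCol (h :: t) (c : Int))).map (fun c : Nat => (c : Int)))
          ((c : Nat) : Int) = isSepCol (h :: t) (c : Int) := by
      intro c
      cases hB : isSepCol (h :: t) (c : Int) with
      | true =>
          have hB' := hB
          rw [isSepCol, List.all_cons, Bool.and_eq_true] at hB'
          have hsome : h.toList[c]? = some ' ' := by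
            have := hB'.1
            rw [PySem.List.pyGet?_natCast] at this
            simpa using this
          have hcN : c < h.toList.length := by
            rcases List.getElem?_eq_some_iff.1 hsome with ⟨hlt, _⟩
            exact hlt
          exact (set_contains_iff _ _).2
            (List.mem_map_of_mem (List.mem_filter.2 ⟨List.mem_range.2 hcN, hB⟩))
      | false =>
          cases hcb : PySem.Set.contains (((List.range h.toList.length).filter
              (fun c : Nat => isSepCol (h :: t) (c : Int))).map (fun c : Nat => (c : Int)))
              ((c : Nat) : Int) with
          | false => rfl
          | true =>
              exfalso
              obtain ⟨d, hd, hdc⟩ := List.mem_map.1 ((set_contains_iff _ _).1 hcb)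
              have hdce : d = c := by exact_mod_cast hdc
              subst hdce
              exact absurd (List.mem_filter.1 hd).2 (by simp [hB])
    have hrow : ∀ line ∈ h :: t,
        aRow (sepColIdxs (h :: t)) line
          = bRow (pyMaxLen (h :: t)) (sepColSet (h :: t)) line := by
      intro line hl
      have hlL : line.toList.length = h.toList.length := hlen' line hl
      have hle : h.toList.length ≤ line.toList.length := le_of_eq hlL.symm
      have hstream : List.foldl
          (fun (st : List String × List Char) (c : Nat) =>
            if isSepCol (h :: t) ((c : Nat) : Int) then (st.1 ++ [String.ofList st.2], ([] : List Char))
            else (st.1, st.2 ++ [(line.toList[c]?).getD ' ']))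
          ([], []) (List.range h.toList.length)
        = (fieldsOf line.toList (-1 :: ((List.range h.toList.length).filter
              (fun c : Nat => isSepCol (h :: t) (c : Int))).map (fun c : Nat => (c : Int))),
           PySem.List.slice line.toList
             (some (((((List.range h.toList.length).filter
                 (fun c : Nat => isSepCol (h :: t) (c : Int))).map
                   (fun c : Nat => (c : Int))).getLastD (-1)) + 1))
             (some (h.toList.length : Int))) :=
        stream_inv line.toList (fun c : Nat => isSepCol (h :: t) (c : Int)) h.toList.length hle
      rw [hseps, hset, hM, aRow_eq_fieldsOf]
      simp only [bRow]
      rw [PySem.List.pyRange_zero_natCast, List.foldl_map]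
      simp only [hcontAll, PySem.List.pyGet?_natCast]
      rw [hstream]
      dsimp only
      rw [← List.cons_append, fieldsOf_concat, List.getLastD_cons]
    unfold process process_alt
    rw [PySem.List.foldl_append_singleton_eq_map, PySem.List.foldl_append_singleton_eq_map]
    simpa using List.map_congr_left hrow
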